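-- pv_equiv track=rewrite | github.com/ArielKomen/afvinkopdrachten-ArielKomen | z afvinkopdracht 6.py | iteratief
-- ===== SOURCE A (Python) =====
-- def iteratief(sequentie):
--     alles = 0
--     for letter in sequentie:
--         if letter in "ATCG":
--             alles += 1
--
--     if len(sequentie) == alles:
--         return True
--     else:
--         return False
-- ===== SOURCE B (Python) =====
-- def iteratief(sequentie):
--     return set(sequentie) <= set("ATCG")
-- ===== Notes on version B (the rewrite author's own statement) =====
-- stated objective: simpler
-- what changed: Replaces the count-valid-letters-then-compare-to-length loop by a one-line subset test of the string's distinct characters against the ATCG alphabet.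
import Mathlib
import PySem

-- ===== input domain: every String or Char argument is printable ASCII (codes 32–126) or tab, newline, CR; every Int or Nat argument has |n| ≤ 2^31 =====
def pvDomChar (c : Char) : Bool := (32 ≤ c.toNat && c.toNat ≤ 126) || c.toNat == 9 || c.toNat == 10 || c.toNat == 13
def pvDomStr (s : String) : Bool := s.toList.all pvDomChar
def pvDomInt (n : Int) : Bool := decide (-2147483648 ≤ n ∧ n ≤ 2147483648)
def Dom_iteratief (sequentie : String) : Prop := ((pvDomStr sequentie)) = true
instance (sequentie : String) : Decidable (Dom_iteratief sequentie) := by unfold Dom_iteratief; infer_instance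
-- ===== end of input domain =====

-- B replaces A's count-valid-letters-then-compare-to-length loop by a subset test of the string's distinct characters against the ATCG alphabet (simpler).

-- ===== PORT A =====
def iteratief (sequentie : String) : Bool :=
  let alles : Int :=
    sequentie.toList.foldl (fun alles letter =>
      if "ATCG".toList.contains letter then alles + 1 else alles) 0
  if (sequentie.toList.length : Int) = alles then true else false

-- ===== PORT B =====
def iteratief_alt (sequentie : String) : Bool :=
  PySem.Set.issubset (PySem.Set.ofList sequentie.toList) (PySem.Set.ofList "ATCG".toList)

-- ===== PRECONDITION & SPEC =====
def Spec_iteratief (sequentie : String) (out : Bool) : Prop := out = iteratief_alt sequentie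
instance (sequentie : String) (out : Bool) : Decidable (Spec_iteratief sequentie out) := by unfold Spec_iteratief; infer_instance

-- ===== CLAIM (what is proved, stated in full; the proofs are below) =====
def Claim_equal_iteratief : Prop := ∀ (sequentie : String), Dom_iteratief sequentie → Spec_iteratief sequentie (iteratief sequentie)

-- ===== LEMMAS AND PROOFS =====
theorem pv_foldl_count (p : Char → Bool) (l : List Char) (a : Int) :
    l.foldl (fun alles letter => if p letter then alles + 1 else alles) a
      = a + ((l.filter p).length : Int) := by
  induction l generalizing a with
  | nil => simp
  | cons c t ih =>
    by_cases h : p c <;> simp [List.foldl, h, ih] <;> ring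

theorem pv_A_iff (l : List Char) :
    ((l.length : Int) = ((l.filter (fun c => "ATCG".toList.contains c)).length : Int))
      ↔ ∀ c ∈ l, c ∈ "ATCG".toList := by
  rw [Int.natCast_inj, eq_comm, List.length_filter_eq_length_iff]
  simp

-- ===== VERDICT (by name: the statement is the Claim_ definition above) =====
theorem iteratief_spec : Claim_equal_iteratief := by
  unfold Claim_equal_iteratief
  intro s _
  unfold Spec_iteratief iteratief iteratief_alt
  rw [pv_foldl_count]
  simp only [zero_add]
  by_cases h : ∀ c ∈ s.toList, c ∈ "ATCG".toList
  · rw [if_pos ((pv_A_iff s.toList).mpr h)]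
    rw [eq_comm, PySem.Set.issubset_iff]
    intro x hx
    rw [PySem.Set.mem_ofList] at hx ⊢
    exact h x hx
  · rw [if_neg (fun he => h ((pv_A_iff s.toList).mp he))]
    rw [eq_comm, ← Bool.not_eq_true, PySem.Set.issubset_iff]
    intro hc
    exact h (fun c hcm => (PySem.Set.mem_ofList _ _).mp (hc c ((PySem.Set.mem_ofList _ _).mpr hcm)))
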